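-- pv_equiv track=rewrite | github.com/sheilapaiva/LabProg1 | Unidade10/agrupa_matriculas/agrupa_matriculas.py | agrupa_por_periodo
-- ===== SOURCE A (Python) =====
-- def meu_in(mapa, procurado):
-- 	encontrou = False
-- 	for elemento in mapa:
-- 		if elemento == procurado:
-- 			mapa[elemento] += 1
-- 			encontrou = True
-- 			break
-- 	if encontrou == False:
-- 		mapa[procurado] = 1
--
-- def agrupa_por_periodo(turma):
-- 	periodo_ingresso = []
-- 	for elemento in turma:
-- 		string = ""
-- 		for digito in range(0,3):
-- 			string += elemento[digito]
-- 		periodo_ingresso.append(string)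
--
-- 	mapa = {}
-- 	for i in range(len(turma)):
-- 		meu_in(mapa, periodo_ingresso[i])
--
-- 	return mapa
-- ===== SOURCE B (Python) =====
-- def agrupa_por_periodo(turma):
--     prefixes = [elem[0] + elem[1] + elem[2] for elem in turma]
--     return {p: prefixes.count(p) for p in dict.fromkeys(prefixes)}
-- ===== Notes on version B (the rewrite author's own statement) =====
-- stated objective: simpler
-- what changed: Replaces the incremental dict built by meu_in's per-element linear key-scan-with-break with a two-phase pass: extract all prefixes, dedup them in first-occurrence order, then count each distinct prefix once with list.count.
import Mathlib
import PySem

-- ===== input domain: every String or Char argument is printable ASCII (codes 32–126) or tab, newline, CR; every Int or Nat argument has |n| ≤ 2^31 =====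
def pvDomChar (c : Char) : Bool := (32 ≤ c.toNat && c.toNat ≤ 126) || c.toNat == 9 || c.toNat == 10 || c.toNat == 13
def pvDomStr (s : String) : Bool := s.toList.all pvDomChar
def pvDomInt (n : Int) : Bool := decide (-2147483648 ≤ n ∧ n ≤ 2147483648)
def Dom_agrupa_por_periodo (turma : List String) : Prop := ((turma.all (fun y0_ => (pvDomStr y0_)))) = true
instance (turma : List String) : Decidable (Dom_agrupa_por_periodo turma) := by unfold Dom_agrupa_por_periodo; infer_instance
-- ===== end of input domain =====

-- B replaces meu_in's incremental scan-and-increment dict building with dedup-then-count (simpler decomposition, same result).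


-- ===== PORT A =====
-- elemento[digito] : a one-character string; none (= IndexError) is excluded by Pre_, "" is a placeholder never hit under Pre_
def pvCharStr (e : String) (i : Int) : String :=
  match PySem.List.pyGet? e.toList i with
  | some c => String.ofList [c]
  | none => ""

-- the 'for elemento in mapa: … break' search inside meu_in
def pvMeuInLoop (keys : List String) (mapa : PySem.Dict String Int) (procurado : String) :
    PySem.Dict String Int × Bool :=
  match keys with
  | [] => (mapa, false)
  | elemento :: resto =>
      if elemento == procurado then (mapa.modify elemento 0 (· + 1), true)
      else pvMeuInLoop resto mapa procurado

def pv_meu_in (mapa : PySem.Dict String Int) (procurado : String) : PySem.Dict String Int :=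
  let r := pvMeuInLoop mapa.keys mapa procurado
  if r.2 == false then r.1.insert procurado 1 else r.1

def agrupa_por_periodo (turma : List String) : List (String × Int) :=
  let periodo_ingresso :=
    turma.foldl (fun acc elemento =>
      acc ++ [(PySem.List.pyRange 0 3 1).foldl (fun s d => s ++ pvCharStr elemento d) ""]) []
  let mapa :=
    (PySem.List.pyRange 0 (turma.length : Int) 1).foldl
      (fun m i => pv_meu_in m (PySem.List.pyGetD periodo_ingresso i "")) PySem.Dict.empty
  mapa.items

-- ===== PORT B =====
def agrupa_por_periodo_alt (turma : List String) : List (String × Int) :=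
  let prefixes := turma.map (fun e => pvCharStr e 0 ++ pvCharStr e 1 ++ pvCharStr e 2)
  (PySem.List.dedup prefixes).map (fun p => (p, (prefixes.count p : Int)))

-- ===== PRECONDITION & SPEC =====
-- Pre_ excludes exactly the inputs containing an element shorter than 3 characters, on which A raises IndexError.
def Pre_agrupa_por_periodo (turma : List String) : Prop :=
  ∀ e ∈ turma, 3 ≤ e.length

instance (turma : List String) : Decidable (Pre_agrupa_por_periodo turma) := by
  unfold Pre_agrupa_por_periodo; infer_instance

def pvWitness_agrupa_por_periodo : List String := ["2019.1-AAA", "2019.2-BBB", "2019.1-CCC"]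

def Spec_agrupa_por_periodo (turma : List String) (out : List (String × Int)) : Prop := out = agrupa_por_periodo_alt turma
instance (turma : List String) (out : List (String × Int)) : Decidable (Spec_agrupa_por_periodo turma out) := by unfold Spec_agrupa_por_periodo; infer_instance

-- ===== CLAIM (what is proved, stated in full; the proofs are below) =====
def Claim_equal_agrupa_por_periodo : Prop := ∀ (turma : List String), Dom_agrupa_por_periodo turma → Pre_agrupa_por_periodo turma → Spec_agrupa_por_periodo turma (agrupa_por_periodo turma)

-- ===== LEMMAS AND PROOFS =====

theorem pvMeuInLoop_not_mem (ks : List String) (m : PySem.Dict String Int) (p : String)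
    (h : p ∉ ks) : pvMeuInLoop ks m p = (m, false) := by
  induction ks with
  | nil => rfl
  | cons k rest ih =>
      simp only [pvMeuInLoop]
      rw [if_neg, ih (fun hm => h (List.mem_cons_of_mem _ hm))]
      simp only [beq_iff_eq]
      intro hk; exact h (hk ▸ List.mem_cons_self)

theorem pvMeuInLoop_mem (ks : List String) (m : PySem.Dict String Int) (p : String)
    (h : p ∈ ks) : pvMeuInLoop ks m p = (m.modify p 0 (· + 1), true) := by
  induction ks with
  | nil => cases h
  | cons k rest ih =>
      simp only [pvMeuInLoop]
      by_cases hk : k = p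
      · subst hk; simp
      · rw [if_neg (by simp [hk])]
        exact ih (by cases h with | head => exact absurd rfl hk | tail _ h' => exact h')

-- insert with 1 on a missing key is exactly the counter step
theorem insert_one_eq_modify (m : PySem.Dict String Int) (p : String) (h : p ∉ m.keys) :
    m.insert p 1 = m.modify p 0 (· + 1) := by
  have h' : ∀ q ∈ m.items, ¬ (q.1 == p) = true := by
    intro q hq hb
    exact h (by simp only [PySem.Dict.keys]; exact List.mem_map.mpr ⟨q, hq, beq_iff_eq.mp hb⟩)
  have hc : (m.items.any fun q => q.1 == p) = false := by
    simp only [List.any_eq_false]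
    exact h'
  have hn : m.get? p = none := by
    rw [PySem.Dict.get?_eq_none_iff_contains]
    simp [PySem.Dict.contains, hc]
  have hg : m.getD p 0 = 0 := by simp [PySem.Dict.getD, hn]
  simp [PySem.Dict.insert, PySem.Dict.modify, PySem.Dict.contains, hc, hg]

theorem pv_meu_in_eq (m : PySem.Dict String Int) (p : String) :
    pv_meu_in m p = m.modify p 0 (· + 1) := by
  by_cases h : p ∈ m.keys
  · simp [pv_meu_in, pvMeuInLoop_mem m.keys m p h]
  · simp only [pv_meu_in, pvMeuInLoop_not_mem m.keys m p h]
    simpa using insert_one_eq_modify m p h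

-- A's inner 3-step string loop is B's three concatenated characters
theorem prefix_loop_eq (e : String) :
    (PySem.List.pyRange 0 3 1).foldl (fun s d => s ++ pvCharStr e d) ""
      = pvCharStr e 0 ++ pvCharStr e 1 ++ pvCharStr e 2 := by
  have h3 : PySem.List.pyRange 0 3 1 = [0, 1, 2] := by decide
  rw [h3]
  simp [List.foldl]

-- ===== VERDICT (by name: the statement is the Claim_ definition above) =====
theorem agrupa_por_periodo_spec : Claim_equal_agrupa_por_periodo := by
  intro turma _ _
  unfold Spec_agrupa_por_periodo agrupa_por_periodo agrupa_por_periodo_alt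
  simp only [PySem.List.foldl_append_singleton_eq_map, List.nil_append, prefix_loop_eq]
  have hfun : pv_meu_in = fun m p => m.modify p 0 (· + 1) := funext fun m => funext fun p => pv_meu_in_eq m p
  simp only [hfun]
  have hlen : (turma.length : Int)
      = ((turma.map (fun e => pvCharStr e 0 ++ pvCharStr e 1 ++ pvCharStr e 2)).length : Int) := by simp
  rw [hlen]
  have h := PySem.List.foldl_pyRange_zero_pyGetD'
      (turma.map (fun e => pvCharStr e 0 ++ pvCharStr e 1 ++ pvCharStr e 2)) ""
      (fun (m : PySem.Dict String Int) p => m.modify p 0 (· + 1)) PySem.Dict.empty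
  have hcounter : (PySem.List.pyRange 0
        ((turma.map (fun e => pvCharStr e 0 ++ pvCharStr e 1 ++ pvCharStr e 2)).length : Int) 1).foldl
      (fun (m : PySem.Dict String Int) i =>
        m.modify (PySem.List.pyGetD (turma.map (fun e => pvCharStr e 0 ++ pvCharStr e 1 ++ pvCharStr e 2)) i "") 0 (· + 1))
      PySem.Dict.empty
      = PySem.Dict.counter (turma.map (fun e => pvCharStr e 0 ++ pvCharStr e 1 ++ pvCharStr e 2)) := by
    simpa [PySem.Dict.counter_eq_foldl] using h
  rw [hcounter, PySem.Dict.items_counter]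
  simp
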